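-- pv_equiv track=rewrite | github.com/pypi-data/pypi-mirror-389 | packages/emdbva/emdbva-0.0.1.dev125.tar.gz/emdbva-0.0.1.dev125/va/metrics/smoc.py | restructure_dict
-- ===== SOURCE A (Python) =====
-- def restructure_dict(data):
--     """
--     Reformat dictionary
--     data: a dictionary as "('A', 659, 'PHE'), ('A', 416, 'GLU'), ('C', 651, 'GLU'), ('A', 498, 'GLN')}"
--     return: a dictionary {'A': {416: 'GLU', 498: 'GLN', 659: 'PHE'}, 'C': {651: 'GLU'}}
--     """
--
--     restructured_dict = {}
--     for item in data:
--         chain, number, residue = item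
--         if chain not in restructured_dict:
--             restructured_dict[chain] = {}
--         restructured_dict[chain][number] = residue
--     # Sort residue numbers within each chain
--     for chain in restructured_dict:
--         restructured_dict[chain] = dict(sorted(restructured_dict[chain].items()))
--     return restructured_dict
-- ===== SOURCE B (Python) =====
-- def restructure_dict(data):
--     chains = []
--     for item in data:
--         if item[0] not in chains:
--             chains.append(item[0])
--     result = {}
--     for chain in chains:
--         pairs = sorted((item[1:] for item in data if item[0] == chain), key=lambda p: p[0])
--         inner = {}
--         for number, residue in pairs:
--             inner[number] = residue
--         result[chain] = inner
--     return result
-- ===== Notes on version B (the rewrite author's own statement) =====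
-- stated objective: alternative
-- what changed: Instead of A's single pass building a dict of dicts followed by a re-sorting pass over every inner dict, B first collects the distinct chains in first-appearance order, then for each chain filters out its (number, residue) pairs, stable-sorts them by number once and inserts them in sorted order, so the inner dicts are born sorted (duplicates still resolve last-wins by stability) and no nested dict is rebuilt.
import Mathlib
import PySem

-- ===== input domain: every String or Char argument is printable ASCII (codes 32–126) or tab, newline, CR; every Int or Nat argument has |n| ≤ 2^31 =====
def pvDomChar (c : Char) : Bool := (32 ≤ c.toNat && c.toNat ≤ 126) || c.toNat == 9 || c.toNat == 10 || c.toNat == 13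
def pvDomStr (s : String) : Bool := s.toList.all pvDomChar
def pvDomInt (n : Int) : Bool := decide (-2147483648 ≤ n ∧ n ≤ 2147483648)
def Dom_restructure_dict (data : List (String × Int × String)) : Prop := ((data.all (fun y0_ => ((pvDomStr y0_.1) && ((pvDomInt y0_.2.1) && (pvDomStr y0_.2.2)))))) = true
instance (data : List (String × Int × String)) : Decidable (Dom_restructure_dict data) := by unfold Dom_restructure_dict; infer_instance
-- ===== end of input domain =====

-- B replaces A's dict-of-dicts-then-resort with a chain-major decomposition (distinct chains, filter, stable sort, insert in order); same return values.


-- ===== PORT A =====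
-- "for chain in restructured_dict: ... = dict(sorted(...items()))": each value is
-- replaced in place, so the association list keeps its key order with sorted items
-- (sorted under Python's tuple comparison = sorted2 with the fst/snd tuple key).

def restructure_dict (data : List (String × Int × String)) : List (String × List (Int × String)) :=
  let d := data.foldl (fun (d : PySem.Dict String (PySem.Dict Int String)) item =>
      let d := if d.contains item.1 then d else d.insert item.1 PySem.Dict.empty
      d.insert item.1 ((d.getD item.1 PySem.Dict.empty).insert item.2.1 item.2.2))
    PySem.Dict.empty
  -- second loop: sort residue numbers within each chain
  d.items.map (fun p => (p.1, PySem.List.sorted2 p.2.items (fun q => q.1) (fun q => q.2)))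

-- ===== PORT B =====
def restructure_dict_alt (data : List (String × Int × String)) : List (String × List (Int × String)) :=
  let chains : PySem.Set String := data.foldl (fun cs item => PySem.Set.add cs item.1) PySem.Set.empty
  chains.map (fun chain =>
    let pairs := PySem.List.sorted ((data.filter (fun item => item.1 == chain)).map (fun item => item.2)) (fun p => p.1) false
    let inner := pairs.foldl (fun (d : PySem.Dict Int String) p => d.insert p.1 p.2) PySem.Dict.empty
    (chain, inner.items))


-- ===== PRECONDITION & SPEC =====
def Spec_restructure_dict (data : List (String × Int × String)) (out : List (String × List (Int × String))) : Prop := out = restructure_dict_alt data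
instance (data : List (String × Int × String)) (out : List (String × List (Int × String))) : Decidable (Spec_restructure_dict data out) := by unfold Spec_restructure_dict; infer_instance

-- ===== CLAIM (what is proved, stated in full; the proofs are below) =====
def Claim_equal_restructure_dict : Prop := ∀ (data : List (String × Int × String)), Dom_restructure_dict data → Spec_restructure_dict data (restructure_dict data)

-- ===== LEMMAS AND PROOFS =====

def pvInner (l : List (Int × String)) : PySem.Dict Int String :=
  l.foldl (fun d p => d.insert p.1 p.2) PySem.Dict.empty

theorem pv_getD_pvInner (l : List (Int × String)) (k : Int) (dflt : String) :
    (pvInner l).getD k dflt = ((l.filter (fun p => p.1 == k)).map (fun p => p.2)).getLastD dflt := by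
  induction l using List.reverseRecOn with
  | nil => simp [pvInner, PySem.Dict.getD_empty]
  | append_singleton l p ih =>
      rw [pvInner, List.foldl_append, ← pvInner]
      simp only [List.foldl_cons, List.foldl_nil]
      rw [PySem.Dict.getD_insert, List.filter_append]
      by_cases hk : k = p.1
      · subst hk
        simp
      · rw [if_neg hk, List.filter_cons]
        have : (p.1 == k) = false := by simp [Ne.symm hk]
        simp [this, ih]

theorem pv_keys_pvInner (l : List (Int × String)) :
    (pvInner l).keys = PySem.Set.ofList (l.map (fun p => p.1)) := by
  have h := PySem.Dict.keys_foldl_insert_key (ν := String) l (fun p => p.1)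
      (fun _ p => p.2) PySem.Dict.empty
  simpa [pvInner, PySem.Set.update, PySem.Dict.keys_empty, PySem.Set.ofList] using h

theorem pv_nodup_keys_pvInner (l : List (Int × String)) : (pvInner l).keys.Nodup := by
  rw [pv_keys_pvInner]; exact PySem.Set.nodup_ofList _

theorem pv_ofList_sublist {α : Type} [BEq α] [LawfulBEq α] (zs : List α) :
    (PySem.Set.ofList zs).Sublist zs := by
  induction zs using List.reverseRecOn with
  | nil => simp [PySem.Set.ofList]
  | append_singleton zs z ih =>
      rw [PySem.Set.ofList_eq_foldl, List.foldl_append, ← PySem.Set.ofList_eq_foldl]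
      simp only [List.foldl_cons, List.foldl_nil, PySem.Set.add]
      by_cases hc : PySem.Set.contains (PySem.Set.ofList zs) z = true
      · rw [if_pos hc]; exact ih.trans (List.sublist_append_left zs [z])
      · rw [if_neg hc]; exact List.Sublist.append ih (List.Sublist.refl [z])
theorem pv_insertBy_congr {α : Type} (f g : α → α → Bool) (x : α) :
    ∀ (acc : List α), (∀ y ∈ acc, f x y = g x y) →
      PySem.List.insertBy f x acc = PySem.List.insertBy g x acc := by
  intro acc
  induction acc with
  | nil => intro _; rfl
  | cons y ys ih =>
      intro h
      simp only [PySem.List.insertBy]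
      rw [h y (by simp)]
      by_cases hg : g x y = true
      · rw [if_pos hg, if_pos hg]
      · rw [if_neg hg, if_neg hg, ih (fun z hz => h z (by simp [hz]))]

theorem pv_filter_insertBy_of_ne (x : Int × String) (k : Int) (hx : (x.1 == k) = false) :
    ∀ (ys : List (Int × String)),
      (PySem.List.insertBy (fun a b => decide (a.1 < b.1)) x ys).filter (fun p => p.1 == k) =
      ys.filter (fun p => p.1 == k) := by
  intro ys
  induction ys with
  | nil => simp [PySem.List.insertBy, hx]
  | cons y ys ih =>
      simp only [PySem.List.insertBy]
      by_cases hb : decide (x.1 < y.1) = true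
      · rw [if_pos hb]
        simp [List.filter_cons, hx]
      · rw [if_neg hb]
        simp only [List.filter_cons]
        rw [ih]

theorem pv_filter_insertBy_self (x : Int × String) :
    ∀ (ys : List (Int × String)), ys.Pairwise (fun a b => a.1 ≤ b.1) →
      (PySem.List.insertBy (fun a b => decide (a.1 < b.1)) x ys).filter (fun p => p.1 == x.1) =
      ys.filter (fun p => p.1 == x.1) ++ [x] := by
  intro ys
  induction ys with
  | nil => simp [PySem.List.insertBy]
  | cons y ys ih =>
      intro hp
      simp only [PySem.List.insertBy]
      by_cases hb : decide (x.1 < y.1) = true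
      · rw [if_pos hb]
        have hlt : x.1 < y.1 := of_decide_eq_true hb
        have hall : ∀ p ∈ y :: ys, (p.1 == x.1) = false := by
          intro p hpmem
          rcases List.mem_cons.mp hpmem with rfl | ht
          · simp; omega
          · have := (List.pairwise_cons.mp hp).1 p ht
            simp; omega
        rw [List.filter_cons_of_pos (by simp),
            List.filter_eq_nil_iff.mpr (fun p hpmem => by simp [hall p hpmem])]
        simp
      · rw [if_neg hb]
        simp only [List.filter_cons]
        rw [ih (List.pairwise_cons.mp hp).2]
        by_cases hy : (y.1 == x.1) = true
        · simp [hy]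
        · simp [eq_false_of_ne_true hy]

theorem pv_foldl_insertBy_congr {α : Type} (f g : α → α → Bool) :
    ∀ (xs acc : List α), (∀ a b, (a ∈ xs ∨ a ∈ acc) → (b ∈ xs ∨ b ∈ acc) → f a b = g a b) →
      xs.foldl (fun acc x => PySem.List.insertBy f x acc) acc =
      xs.foldl (fun acc x => PySem.List.insertBy g x acc) acc := by
  intro xs
  induction xs with
  | nil => intro acc _; rfl
  | cons x xs ih =>
      intro acc h
      simp only [List.foldl_cons]
      rw [pv_insertBy_congr f g x acc (fun y hy => h x y (Or.inl (by simp)) (Or.inr hy))]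
      apply ih
      intro a b ha hb
      apply h a b
      · rcases ha with ha | ha
        · exact Or.inl (by simp [ha])
        · rcases (PySem.List.mem_insertBy _ x a acc).mp ha with rfl | ha
          · exact Or.inl (by simp)
          · exact Or.inr ha
      · rcases hb with hb | hb
        · exact Or.inl (by simp [hb])
        · rcases (PySem.List.mem_insertBy _ x b acc).mp hb with rfl | hb
          · exact Or.inl (by simp)
          · exact Or.inr hb

theorem pv_sorted2_eq_sorted_fst (xs : List (Int × String))
    (h : (xs.map (fun p => p.1)).Nodup) :
    PySem.List.sorted2 xs (fun q => q.1) (fun q => q.2) false =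
    PySem.List.sorted xs (fun q => q.1) false := by
  have hinj : ∀ a ∈ xs, ∀ b ∈ xs, a.1 = b.1 → a = b := by
    intro a ha b hb hab
    exact List.inj_on_of_nodup_map h ha hb hab
  simp only [PySem.List.sorted2, PySem.List.sorted]
  apply pv_foldl_insertBy_congr
  intro a b ha hb
  replace ha := ha.resolve_right (List.not_mem_nil)
  replace hb := hb.resolve_right (List.not_mem_nil)
  by_cases h1 : a.1 < b.1
  · simp [h1]
  · by_cases h2 : b.1 < a.1
    · simp [h1, h2]
    · have : a.1 = b.1 := le_antisymm (not_lt.mp h2) (not_lt.mp h1)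
      have hab : a = b := hinj a ha b hb this
      subst hab
      simp

theorem pv_filter_sorted (l : List (Int × String)) (k : Int) :
    (PySem.List.sorted l (fun p => p.1) false).filter (fun p => p.1 == k) =
    l.filter (fun p => p.1 == k) := by
  induction l using List.reverseRecOn with
  | nil => rfl
  | append_singleton l x ih =>
      have hstep : PySem.List.sorted (l ++ [x]) (fun p => p.1) false =
          PySem.List.insertBy (fun a b => decide (a.1 < b.1)) x
            (PySem.List.sorted l (fun p => p.1) false) := by
        rw [PySem.List.sorted_eq_foldl_insertBy, List.foldl_append,
            ← PySem.List.sorted_eq_foldl_insertBy]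
        rfl
      rw [hstep, List.filter_append]
      by_cases hx : (x.1 == k) = true
      · have hk : x.1 = k := by simpa using hx
        subst hk
        rw [pv_filter_insertBy_self x _ (PySem.List.sorted_pairwise l (fun p => p.1)), ih]
        simp
      · rw [pv_filter_insertBy_of_ne x k (eq_false_of_ne_true hx), ih]
        simp [eq_false_of_ne_true hx]

theorem pv_inner_eq (l : List (Int × String)) :
    PySem.List.sorted2 (pvInner l).items (fun q => q.1) (fun q => q.2) false =
    (pvInner (PySem.List.sorted l (fun p => p.1) false)).items := by
  have hnd : ((pvInner l).items.map (fun p => p.1)).Nodup := by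
    have := pv_nodup_keys_pvInner l
    simpa [PySem.Dict.keys] using this
  rw [pv_sorted2_eq_sorted_fst _ hnd]
  set s := PySem.List.sorted l (fun p => p.1) false with hs
  have hg : ∀ k dflt, (pvInner s).getD k dflt = (pvInner l).getD k dflt := by
    intro k dflt
    rw [pv_getD_pvInner, pv_getD_pvInner, hs, pv_filter_sorted]
  have hitems : (pvInner s).items =
      (PySem.Set.ofList (s.map (fun p => p.1))).map (fun k => (k, (pvInner l).getD k "")) := by
    rw [PySem.Dict.items_eq_map_keys _ (pv_nodup_keys_pvInner s) "", pv_keys_pvInner]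
    exact List.map_congr_left (fun k _ => by rw [hg])
  have hitemsl : (pvInner l).items =
      (PySem.Set.ofList (l.map (fun p => p.1))).map (fun k => (k, (pvInner l).getD k "")) := by
    rw [PySem.Dict.items_eq_map_keys _ (pv_nodup_keys_pvInner l) "", pv_keys_pvInner]
  apply PySem.List.sorted_eq_of_perm_of_pairwise_lt
  · -- permutation
    rw [hitems, hitemsl]
    apply List.Perm.map
    rw [List.perm_ext_iff_of_nodup (PySem.Set.nodup_ofList _) (PySem.Set.nodup_ofList _)]
    intro a
    rw [PySem.Set.mem_ofList, PySem.Set.mem_ofList]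
    exact ((PySem.List.sorted_perm l (fun p => p.1) false).map (fun p => p.1)).mem_iff
  · -- strictly increasing keys
    rw [hitems]
    rw [List.pairwise_map]
    have hle : (s.map (fun p => p.1)).Pairwise (· ≤ ·) :=
      PySem.List.sorted_map_key_pairwise l (fun p => p.1)
    have hsub := pv_ofList_sublist (s.map (fun p => p.1))
    have hle' := hle.sublist hsub
    have hne : (PySem.Set.ofList (s.map (fun p => p.1))).Pairwise (· ≠ ·) :=
      PySem.Set.nodup_ofList _
    exact (hle'.and hne).imp (fun h => lt_of_le_of_ne h.1 h.2)

def pvStepA (d : PySem.Dict String (PySem.Dict Int String)) (item : String × Int × String) :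
    PySem.Dict String (PySem.Dict Int String) :=
  let d := if d.contains item.1 then d else d.insert item.1 PySem.Dict.empty
  d.insert item.1 ((d.getD item.1 PySem.Dict.empty).insert item.2.1 item.2.2)

def pvChains (data : List (String × Int × String)) : List String :=
  PySem.Set.ofList (data.map (fun t => t.1))

def pvPairs (c : String) (data : List (String × Int × String)) : List (Int × String) :=
  (data.filter (fun t => t.1 == c)).map (fun t => t.2)

theorem pv_pairs_append (c : String) (xs : List (String × Int × String)) (t : String × Int × String) :
    pvPairs c (xs ++ [t]) = pvPairs c xs ++ (if t.1 == c then [t.2] else []) := by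
  simp only [pvPairs, List.filter_append, List.map_append, List.filter_cons, List.filter_nil]
  by_cases h : (t.1 == c) = true
  · simp [h]
  · simp [eq_false_of_ne_true h]

theorem pv_chains_append (xs : List (String × Int × String)) (t : String × Int × String) :
    pvChains (xs ++ [t]) =
      if t.1 ∈ pvChains xs then pvChains xs else pvChains xs ++ [t.1] := by
  simp only [pvChains, List.map_append]
  rw [PySem.Set.ofList_eq_foldl, List.foldl_append, ← PySem.Set.ofList_eq_foldl]
  simp only [List.map_cons, List.map_nil, List.foldl_cons, List.foldl_nil, PySem.Set.add]
  by_cases h : t.1 ∈ PySem.Set.ofList (xs.map (fun t => t.1))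
  · rw [if_pos h, if_pos (by simpa [PySem.Set.contains] using h)]
  · rw [if_neg h, if_neg (by simpa [PySem.Set.contains] using h)]

theorem pv_outer (data : List (String × Int × String)) :
    (data.foldl pvStepA PySem.Dict.empty).items =
    (pvChains data).map (fun c => (c, pvInner (pvPairs c data))) := by
  induction data using List.reverseRecOn with
  | nil => rfl
  | append_singleton xs t ih =>
      rw [List.foldl_append]
      simp only [List.foldl_cons, List.foldl_nil]
      have hkeys : (xs.foldl pvStepA PySem.Dict.empty).keys = pvChains xs := by
        simp only [PySem.Dict.keys, ih, List.map_map]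
        exact List.map_id'' (fun x => rfl) _
      have hndk : (xs.foldl pvStepA PySem.Dict.empty).keys.Nodup := by
        rw [hkeys]; exact PySem.Set.nodup_ofList _
      have hcont : (xs.foldl pvStepA PySem.Dict.empty).contains t.1 =
          decide (t.1 ∈ pvChains xs) := by
        rw [PySem.Dict.contains_eq_decide_mem_keys, hkeys]
      by_cases hmem : t.1 ∈ pvChains xs
      · have hc : (xs.foldl pvStepA PySem.Dict.empty).contains t.1 = true := by
          rw [hcont]; simpa using hmem
        have hget : (xs.foldl pvStepA PySem.Dict.empty).getD t.1 PySem.Dict.empty =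
            pvInner (pvPairs t.1 xs) := by
          apply PySem.Dict.getD_of_mem_items _ _ hndk
          rw [ih]
          exact List.mem_map.mpr ⟨t.1, hmem, rfl⟩
        rw [pvStepA]
        simp only [hc, if_true]
        rw [hget, PySem.Dict.items_insert_of_contains _ _ hc, ih, List.map_map,
            pv_chains_append, if_pos hmem]
        apply List.map_congr_left
        intro c hcmem
        simp only [Function.comp]
        by_cases hceq : c = t.1
        · subst hceq
          rw [pv_pairs_append]
          simp only [BEq.rfl, if_true]
          rw [pvInner, pvInner, List.foldl_append]
          simp
        · have h1 : (c == t.1) = false := by simpa using hceq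
          rw [pv_pairs_append]
          have h2 : (t.1 == c) = false := by simpa using Ne.symm hceq
          simp [h1, h2]
      · have hc : (xs.foldl pvStepA PySem.Dict.empty).contains t.1 = false := by
          rw [hcont]; simpa using hmem
        rw [pvStepA]
        simp only [hc, Bool.false_eq_true, if_false]
        rw [PySem.Dict.getD_insert_self]
        have hc1 : ((xs.foldl pvStepA PySem.Dict.empty).insert t.1 PySem.Dict.empty).contains t.1 = true :=
          PySem.Dict.contains_insert_self _ _ _
        rw [PySem.Dict.items_insert_of_contains _ _ hc1,
            PySem.Dict.items_insert_of_not_contains _ _ hc,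
            List.map_append, ih, List.map_map,
            pv_chains_append, if_neg hmem, List.map_append]
        have hnofst : ∀ c ∈ pvChains xs, c ≠ t.1 := by
          intro c hcmem hceq
          exact hmem (hceq ▸ hcmem)
        congr 1
        · apply List.map_congr_left
          intro c hcmem
          simp only [Function.comp]
          have h1 : (c == t.1) = false := by simpa using hnofst c hcmem
          have h2 : (t.1 == c) = false := by simpa using Ne.symm (hnofst c hcmem)
          rw [pv_pairs_append]
          simp [h1, h2]
        · have hstep : pvPairs t.1 (xs ++ [t]) = pvPairs t.1 xs ++ [t.2] := by
            rw [pv_pairs_append]; simp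
          have hempty : pvPairs t.1 xs = [] := by
            rw [pvPairs, List.filter_eq_nil_iff.mpr, List.map_nil]
            intro p hp
            have : p.1 ∈ xs.map (fun t => t.1) := List.mem_map.mpr ⟨p, hp, rfl⟩
            have hne : p.1 ≠ t.1 := by
              intro he
              exact hmem (by rw [pvChains, PySem.Set.mem_ofList]; exact he ▸ this)
            simpa using hne
          simp only [List.map_cons, List.map_nil, hstep, hempty, List.nil_append]
          simp [pvInner]
theorem pv_final (data : List (String × Int × String)) :
    restructure_dict data = restructure_dict_alt data := by
  have hA : restructure_dict data =
      ((data.foldl pvStepA PySem.Dict.empty).items).map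
        (fun p => (p.1, PySem.List.sorted2 p.2.items (fun q => q.1) (fun q => q.2) false)) := rfl
  have hB : restructure_dict_alt data =
      (data.foldl (fun cs item => PySem.Set.add cs item.1) PySem.Set.empty).map
        (fun c => (c, (pvInner (PySem.List.sorted (pvPairs c data) (fun p => p.1) false)).items)) := rfl
  have hch : data.foldl (fun cs item => PySem.Set.add cs item.1) PySem.Set.empty = pvChains data := by
    rw [pvChains, PySem.Set.ofList_eq_foldl, List.foldl_map]
    rfl
  rw [hA, hB, hch, pv_outer, List.map_map]
  apply List.map_congr_left
  intro c _
  simp only [Function.comp]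
  rw [pv_inner_eq]

-- ===== VERDICT (by name: the statement is the Claim_ definition above) =====
theorem restructure_dict_spec : Claim_equal_restructure_dict := by
  intro data _
  unfold Spec_restructure_dict
  exact pv_final data
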